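-- pv_equiv track=rewrite | github.com/will-assistant/network-path-visualizer | backend/community_decoder.py | infer_preference
-- ===== SOURCE A (Python) =====
-- LP_PRIMARY = 200
--
-- LP_SECONDARY = 150
--
-- LP_TERTIARY = 50
--
-- FAILOVER_CHAINS: dict[str, list[list[int]]] = {
--     "americas": [
--         [1, 2, 3],   # Site 1 failover order
--         [2, 3, 1],   # Site 2
--         [3, 2, 1],   # Site 3
--         [4, 3, 2],   # Site 4 (never transit for 1-3)
--     ],
--     "emea": [
--         [7, 8],
--         [8, 7],
--     ],
--     "apac": [
--         [17, 18, 19],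
--         [18, 17, 19],
--         [19, 17, 18],
--     ],
-- }
--
-- SITE_REGIONS: dict[int, str] = {
--     1: "americas", 2: "americas", 3: "americas", 4: "americas",
--     7: "emea", 8: "emea",
--     17: "apac", 18: "apac", 19: "apac",
-- }
--
-- def infer_preference(oid: int, aid: int) -> tuple[int, str]:
--     """
--     Infer LP and preference from OID/AID pair using the failover matrix.
--
--     The primary firewall for traffic between two sites is the lowest-numbered site.
--     """
--     region = SITE_REGIONS.get(oid)
--     if not region:
--         return 100, "unknown"
--
--     # Find the failover chain for the AID site (the site making the decision)
--     for chain in FAILOVER_CHAINS.get(region, []):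
--         if chain[0] == aid:
--             # Position of the preferred firewall site in the chain
--             # Primary = lowest numbered site between OID and AID
--             preferred_fw = min(oid, aid)
--             if preferred_fw == aid:
--                 return LP_PRIMARY, "primary"
--             else:
--                 # Check position in failover chain
--                 try:
--                     idx = chain.index(oid)
--                     if idx == 0:
--                         return LP_PRIMARY, "primary"
--                     elif idx == 1:
--                         return LP_SECONDARY, "secondary"
--                     else:
--                         return LP_TERTIARY, "tertiary"
--                 except ValueError:
--                     pass
--
--     # If OID == AID, it's local — primary
--     if oid == aid:
--         return LP_PRIMARY, "primary"
--
--     return 100, "unknown"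
-- ===== SOURCE B (Python) =====
-- LP_PRIMARY = 200
--
-- LP_SECONDARY = 150
--
-- LP_TERTIARY = 50
--
-- FAILOVER_CHAINS: dict[str, list[list[int]]] = {
--     "americas": [
--         [1, 2, 3],
--         [2, 3, 1],
--         [3, 2, 1],
--         [4, 3, 2],
--     ],
--     "emea": [
--         [7, 8],
--         [8, 7],
--     ],
--     "apac": [
--         [17, 18, 19],
--         [18, 17, 19],
--         [19, 17, 18],
--     ],
-- }
--
-- SITE_REGIONS: dict[int, str] = {
--     1: "americas", 2: "americas", 3: "americas", 4: "americas",
--     7: "emea", 8: "emea",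
--     17: "apac", 18: "apac", 19: "apac",
-- }
--
--
-- def _build_table() -> dict[tuple[int, int], tuple[int, str]]:
--     """Precompute (oid, aid) -> (lp, label) for every decidable pair."""
--     table = {}
--     for region, chains in FAILOVER_CHAINS.items():
--         sites = [s for s, r in SITE_REGIONS.items() if r == region]
--         for chain in chains:
--             aid = chain[0]
--             for oid in sites:
--                 if aid <= oid:
--                     table[(oid, aid)] = (LP_PRIMARY, "primary")
--                 elif oid in chain:
--                     if chain.index(oid) == 1:
--                         table[(oid, aid)] = (LP_SECONDARY, "secondary")
--                     else:
--                         table[(oid, aid)] = (LP_TERTIARY, "tertiary")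
--     return table
--
--
-- _TABLE = _build_table()
--
--
-- def infer_preference(oid: int, aid: int) -> tuple[int, str]:
--     """
--     Infer LP and preference from OID/AID pair using the failover matrix.
--
--     The primary firewall for traffic between two sites is the lowest-numbered site.
--     """
--     return _TABLE.get((oid, aid), (100, "unknown"))
-- ===== Notes on version B (the rewrite author's own statement) =====
-- stated objective: alternative
-- what changed: Replaces the per-call region lookup, chain scan with positional branching and fallthrough checks by a flat (oid, aid) -> (lp, label) table precomputed once from the failover matrix, so each call is a single dict lookup with default (100, 'unknown').
import Mathlib
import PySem

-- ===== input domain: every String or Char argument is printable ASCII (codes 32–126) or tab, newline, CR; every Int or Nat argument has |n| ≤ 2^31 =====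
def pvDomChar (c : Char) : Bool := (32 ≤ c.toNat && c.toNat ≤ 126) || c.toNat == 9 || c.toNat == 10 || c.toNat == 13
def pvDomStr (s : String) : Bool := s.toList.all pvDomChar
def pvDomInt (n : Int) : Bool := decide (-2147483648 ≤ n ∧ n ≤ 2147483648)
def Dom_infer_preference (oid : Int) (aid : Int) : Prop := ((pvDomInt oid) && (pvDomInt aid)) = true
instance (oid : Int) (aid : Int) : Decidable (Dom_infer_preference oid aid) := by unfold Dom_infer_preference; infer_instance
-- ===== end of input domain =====

-- B replaces A's per-call region lookup + chain scan by a table of all (oid, aid) pairs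
-- precomputed once from the failover matrix, so each call is a single dict lookup (objective: alternative).

-- ===== PORT A =====
def LP_PRIMARY : Int := 200
def LP_SECONDARY : Int := 150
def LP_TERTIARY : Int := 50

def FAILOVER_CHAINS : PySem.Dict String (List (List Int)) :=
  PySem.Dict.ofList
    [ ("americas", [[1, 2, 3], [2, 3, 1], [3, 2, 1], [4, 3, 2]]),
      ("emea", [[7, 8], [8, 7]]),
      ("apac", [[17, 18, 19], [18, 17, 19], [19, 17, 18]]) ]

def SITE_REGIONS : PySem.Dict Int String :=
  PySem.Dict.ofList
    [ (1, "americas"), (2, "americas"), (3, "americas"), (4, "americas"),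
      (7, "emea"), (8, "emea"),
      (17, "apac"), (18, "apac"), (19, "apac") ]

-- the 'for chain in …' loop with its early returns; none = fell through the loop
-- (chain[0] never raises here: the literal chains are nonempty)
def inferLoop (oid : Int) (aid : Int) : List (List Int) → Option (Int × String)
  | [] => none
  | chain :: rest =>
    if PySem.List.pyGet? chain 0 = some aid then
      let preferred_fw := min oid aid
      if preferred_fw = aid then some (LP_PRIMARY, "primary")
      else
        match PySem.List.index? chain oid with
        | some idx =>
          if idx = 0 then some (LP_PRIMARY, "primary")
          else if idx = 1 then some (LP_SECONDARY, "secondary")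
          else some (LP_TERTIARY, "tertiary")
        | none => inferLoop oid aid rest    -- except ValueError: pass
    else inferLoop oid aid rest

def infer_preference (oid : Int) (aid : Int) : Int × String :=
  match PySem.Dict.get? SITE_REGIONS oid with
  | none => (100, "unknown")                 -- 'if not region' (region = None)
  | some region =>
    if region = "" then (100, "unknown")     -- 'if not region' (empty string is falsy)
    else
      match inferLoop oid aid (PySem.Dict.getD FAILOVER_CHAINS region []) with
      | some r => r
      | none => if oid = aid then (LP_PRIMARY, "primary") else (100, "unknown")

-- ===== PORT B =====
-- _build_table: for each region, each chain (aid = chain[0]) and each same-region site oid,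
-- record primary / secondary / tertiary as in Source B.
def buildTable : PySem.Dict (Int × Int) (Int × String) :=
  FAILOVER_CHAINS.items.foldl
    (fun t rc =>
      let sites := (SITE_REGIONS.items.filter (fun p => p.2 == rc.1)).map (·.1)
      rc.2.foldl
        (fun t chain =>
          match PySem.List.pyGet? chain 0 with
          | none => t
          | some aid =>
            sites.foldl
              (fun t oid =>
                if aid ≤ oid then t.insert (oid, aid) (LP_PRIMARY, "primary")
                else if oid ∈ chain then
                  if PySem.List.index? chain oid = some 1 then
                    t.insert (oid, aid) (LP_SECONDARY, "secondary")
                  else t.insert (oid, aid) (LP_TERTIARY, "tertiary")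
                else t)
              t)
        t)
    PySem.Dict.empty

def infer_preference_alt (oid : Int) (aid : Int) : Int × String :=
  PySem.Dict.getD buildTable (oid, aid) (100, "unknown")

-- ===== PRECONDITION & SPEC =====
def Spec_infer_preference (oid : Int) (aid : Int) (out : Int × String) : Prop := out = infer_preference_alt oid aid
instance (oid : Int) (aid : Int) (out : Int × String) : Decidable (Spec_infer_preference oid aid out) := by unfold Spec_infer_preference; infer_instance

-- ===== CLAIM (what is proved, stated in full; the proofs are below) =====
def Claim_equal_infer_preference : Prop := ∀ (oid : Int) (aid : Int), Dom_infer_preference oid aid → Spec_infer_preference oid aid (infer_preference oid aid)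

-- ===== LEMMAS AND PROOFS =====

theorem pv_cases9 (n : Int) :
    n = 1 ∨ n = 2 ∨ n = 3 ∨ n = 4 ∨ n = 7 ∨ n = 8 ∨ n = 17 ∨ n = 18 ∨ n = 19 ∨
      (n ≠ 1 ∧ n ≠ 2 ∧ n ≠ 3 ∧ n ≠ 4 ∧ n ≠ 7 ∧ n ≠ 8 ∧ n ≠ 17 ∧ n ≠ 18 ∧ n ≠ 19) := by
  omega

-- the precomputed table, evaluated
theorem buildTable_eq : buildTable = PySem.Dict.mk
    [ ((1, 1), (200, "primary")), ((2, 1), (200, "primary")), ((3, 1), (200, "primary")), ((4, 1), (200, "primary")),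
      ((1, 2), (50, "tertiary")), ((2, 2), (200, "primary")), ((3, 2), (200, "primary")), ((4, 2), (200, "primary")),
      ((1, 3), (50, "tertiary")), ((2, 3), (150, "secondary")), ((3, 3), (200, "primary")), ((4, 3), (200, "primary")),
      ((2, 4), (50, "tertiary")), ((3, 4), (150, "secondary")), ((4, 4), (200, "primary")),
      ((7, 7), (200, "primary")), ((8, 7), (200, "primary")),
      ((7, 8), (150, "secondary")), ((8, 8), (200, "primary")),
      ((17, 17), (200, "primary")), ((18, 17), (200, "primary")), ((19, 17), (200, "primary")),
      ((17, 18), (150, "secondary")), ((18, 18), (200, "primary")), ((19, 18), (200, "primary")),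
      ((17, 19), (150, "secondary")), ((18, 19), (50, "tertiary")), ((19, 19), (200, "primary")) ] := by
  decide


theorem SITE_REGIONS_eq : SITE_REGIONS = PySem.Dict.mk
    [ (1, "americas"), (2, "americas"), (3, "americas"), (4, "americas"),
      (7, "emea"), (8, "emea"), (17, "apac"), (18, "apac"), (19, "apac") ] := by decide

theorem FAILOVER_CHAINS_eq : FAILOVER_CHAINS = PySem.Dict.mk
    [ ("americas", [[1, 2, 3], [2, 3, 1], [3, 2, 1], [4, 3, 2]]),
      ("emea", [[7, 8], [8, 7]]),
      ("apac", [[17, 18, 19], [18, 17, 19], [19, 17, 18]]) ] := by decide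

theorem get?_mk_nil {κ ν : Type} [BEq κ] (x : κ) :
    (PySem.Dict.mk ([] : List (κ × ν))).get? x = none := rfl

-- outside the nine sites both programs answer (100, "unknown")
theorem A_unk (oid aid : Int) (h1 : oid ≠ 1) (h2 : oid ≠ 2) (h3 : oid ≠ 3) (h4 : oid ≠ 4)
    (h5 : oid ≠ 7) (h6 : oid ≠ 8) (h7 : oid ≠ 17) (h8 : oid ≠ 18) (h9 : oid ≠ 19) :
    infer_preference oid aid = (100, "unknown") := by
  unfold infer_preference
  rw [SITE_REGIONS_eq]
  simp [PySem.Dict.get?_mk_cons, Ne.symm h1, Ne.symm h2, Ne.symm h3, Ne.symm h4,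
    Ne.symm h5, Ne.symm h6, Ne.symm h7, Ne.symm h8, Ne.symm h9, get?_mk_nil]

theorem B_unk (oid aid : Int) (h1 : oid ≠ 1) (h2 : oid ≠ 2) (h3 : oid ≠ 3) (h4 : oid ≠ 4)
    (h5 : oid ≠ 7) (h6 : oid ≠ 8) (h7 : oid ≠ 17) (h8 : oid ≠ 18) (h9 : oid ≠ 19) :
    infer_preference_alt oid aid = (100, "unknown") := by
  unfold infer_preference_alt
  rw [buildTable_eq]
  simp [PySem.Dict.getD, PySem.Dict.get?_mk_cons, Prod.ext_iff, get?_mk_nil,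
    Ne.symm h1, Ne.symm h2, Ne.symm h3, Ne.symm h4,
    Ne.symm h5, Ne.symm h6, Ne.symm h7, Ne.symm h8, Ne.symm h9]

-- ===== VERDICT (by name: the statement is the Claim_ definition above) =====
theorem infer_preference_spec : Claim_equal_infer_preference := by
  intro oid aid _
  unfold Spec_infer_preference
  rcases pv_cases9 oid with h|h|h|h|h|h|h|h|h|⟨h1,h2,h3,h4,h5,h6,h7,h8,h9⟩ <;>
    first
    | (subst h
       rcases pv_cases9 aid with g|g|g|g|g|g|g|g|g|⟨g1,g2,g3,g4,g5,g6,g7,g8,g9⟩ <;>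
         first
         | (subst g; decide)
         | (unfold infer_preference infer_preference_alt
            rw [buildTable_eq, SITE_REGIONS_eq, FAILOVER_CHAINS_eq]
            simp [PySem.Dict.get?_mk_cons, PySem.Dict.getD, inferLoop, get?_mk_nil,
              Ne.symm g1, Ne.symm g2, Ne.symm g3, Ne.symm g4, Ne.symm g5,
              Ne.symm g6, Ne.symm g7, Ne.symm g8, Ne.symm g9]))
    | rw [A_unk oid aid h1 h2 h3 h4 h5 h6 h7 h8 h9, B_unk oid aid h1 h2 h3 h4 h5 h6 h7 h8 h9]
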